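-- pv_equiv track=rewrite | github.com/stuartly/FirmHybirdFuzzer | hybridFuzz/hybridFuzz/mutator.py | locate_diffs
-- ===== SOURCE A (Python) =====
-- def locate_diffs(seed1, seed2):
--     f_loc = -1
--     l_loc = -1
--     minlen = min(len(seed1), len(seed2))
--     for pos in range(minlen):
--         if seed1[pos] != seed2[pos]:
--             if f_loc == -1:
--                 f_loc = pos
--             l_loc = pos
--     return f_loc, l_loc
-- ===== SOURCE B (Python) =====
-- def locate_diffs(seed1, seed2):
--     minlen = min(len(seed1), len(seed2))
--     f_loc = -1
--     for pos in range(minlen):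
--         if seed1[pos] != seed2[pos]:
--             f_loc = pos
--             break
--     l_loc = -1
--     for pos in range(minlen - 1, -1, -1):
--         if seed1[pos] != seed2[pos]:
--             l_loc = pos
--             break
--     return f_loc, l_loc
-- ===== Notes on version B (the rewrite author's own statement) =====
-- stated objective: alternative
-- what changed: Replaces A's single cumulative pass that updates both locations at every differing index with two independent early-breaking scans: a forward scan that stops at the first difference and a backward scan (range(minlen-1,-1,-1)) that stops at the last difference.
import Mathlib
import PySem

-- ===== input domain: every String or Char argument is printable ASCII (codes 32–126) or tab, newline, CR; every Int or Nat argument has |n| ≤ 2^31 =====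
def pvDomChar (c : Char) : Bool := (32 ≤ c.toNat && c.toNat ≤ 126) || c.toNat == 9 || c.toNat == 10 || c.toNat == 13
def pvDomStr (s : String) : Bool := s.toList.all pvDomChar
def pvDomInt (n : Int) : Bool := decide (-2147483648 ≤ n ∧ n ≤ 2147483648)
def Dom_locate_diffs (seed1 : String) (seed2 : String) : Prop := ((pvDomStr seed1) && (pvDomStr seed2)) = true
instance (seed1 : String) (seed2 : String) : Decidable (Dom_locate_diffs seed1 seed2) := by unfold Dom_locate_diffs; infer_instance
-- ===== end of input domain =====

-- B replaces A's single cumulative pass with two independent early-breaking scans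
-- (forward for the first difference, backward for the last); alternative decomposition, same cost.


-- ===== PORT A =====
-- one pass over range(minlen), updating (f_loc, l_loc) at every differing position
def locate_diffs (seed1 : String) (seed2 : String) : Int × Int :=
  let minlen : Int := min (PySem.Str.len seed1) (PySem.Str.len seed2)
  (PySem.List.pyRange 0 minlen 1).foldl
    (fun (st : Int × Int) pos =>
      if PySem.Str.pyGet? seed1 pos ≠ PySem.Str.pyGet? seed2 pos then
        ((if st.1 = -1 then pos else st.1), pos)
      else st)
    (-1, -1)

-- ===== PORT B =====
-- forward early-breaking scan: positions pos, pos+1, … (fuel = remaining positions)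
def pvFwd (seed1 : String) (seed2 : String) (pos : Int) : Nat → Int
  | 0 => -1
  | k + 1 =>
    if PySem.Str.pyGet? seed1 pos ≠ PySem.Str.pyGet? seed2 pos then pos
    else pvFwd seed1 seed2 (pos + 1) k

-- backward early-breaking scan over range(k-1, -1, -1)
def pvBwd (seed1 : String) (seed2 : String) : Nat → Int
  | 0 => -1
  | k + 1 =>
    if PySem.Str.pyGet? seed1 (k : Int) ≠ PySem.Str.pyGet? seed2 (k : Int) then (k : Int)
    else pvBwd seed1 seed2 k

def locate_diffs_alt (seed1 : String) (seed2 : String) : Int × Int :=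
  let minlen : Nat := min seed1.toList.length seed2.toList.length
  (pvFwd seed1 seed2 0 minlen, pvBwd seed1 seed2 minlen)

-- ===== PRECONDITION & SPEC =====
def Spec_locate_diffs (seed1 : String) (seed2 : String) (out : Int × Int) : Prop := out = locate_diffs_alt seed1 seed2
instance (seed1 : String) (seed2 : String) (out : Int × Int) : Decidable (Spec_locate_diffs seed1 seed2 out) := by unfold Spec_locate_diffs; infer_instance

-- ===== CLAIM (what is proved, stated in full; the proofs are below) =====
def Claim_equal_locate_diffs : Prop := ∀ (seed1 : String) (seed2 : String), Dom_locate_diffs seed1 seed2 → Spec_locate_diffs seed1 seed2 (locate_diffs seed1 seed2)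

-- ===== LEMMAS AND PROOFS =====

-- the fold of port A over range(0, n)
def pvFoldA (seed1 : String) (seed2 : String) (n : Nat) : Int × Int :=
  (PySem.List.pyRange 0 (n : Int) 1).foldl
    (fun (st : Int × Int) pos =>
      if PySem.Str.pyGet? seed1 pos ≠ PySem.Str.pyGet? seed2 pos then
        ((if st.1 = -1 then pos else st.1), pos)
      else st)
    (-1, -1)

-- appending one more position to the forward scan
lemma pvFwd_succ (seed1 seed2 : String) (k : Nat) :
    ∀ pos : Int, 0 ≤ pos →
      pvFwd seed1 seed2 pos (k + 1) =
        if pvFwd seed1 seed2 pos k = -1 then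
          (if PySem.Str.pyGet? seed1 (pos + k) ≠ PySem.Str.pyGet? seed2 (pos + k) then pos + k else -1)
        else pvFwd seed1 seed2 pos k := by
  induction k with
  | zero =>
    intro pos _
    simp [pvFwd]
  | succ k ih =>
    intro pos hpos
    have harith : pos + ((k : Int) + 1) = pos + 1 + (k : Int) := by ring
    conv_lhs => rw [pvFwd]
    rw [ih (pos + 1) (by omega)]
    conv_rhs => rw [pvFwd]
    push_cast
    rw [harith]
    have hne : pos ≠ -1 := by omega
    split_ifs <;> simp_all

lemma pvFoldA_eq (seed1 seed2 : String) (n : Nat) :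
    pvFoldA seed1 seed2 n = (pvFwd seed1 seed2 0 n, pvBwd seed1 seed2 n) := by
  induction n with
  | zero => simp [pvFoldA, pvFwd, pvBwd, PySem.List.pyRange_one_eq_nil]
  | succ n ih =>
    have hsplit : PySem.List.pyRange 0 ((n + 1 : Nat) : Int) 1
        = PySem.List.pyRange 0 (n : Int) 1 ++ [(n : Int)] := by
      have := PySem.List.pyRange_one_succ_right (a := 0) (b := (n : Int)) (by positivity)
      push_cast
      exact this
    have hfwd := pvFwd_succ seed1 seed2 n 0 le_rfl
    simp only [zero_add] at hfwd
    unfold pvFoldA at ih ⊢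
    rw [hsplit, List.foldl_append, ih, List.foldl, List.foldl, hfwd]
    simp only [PySem.Str.pyGet?_natCast] at hfwd ⊢
    by_cases hf : pvFwd seed1 seed2 0 n = -1 <;>
      by_cases h : seed1.toList[n]? = seed2.toList[n]? <;>
        simp [pvBwd, hf, h]

-- ===== VERDICT (by name: the statement is the Claim_ definition above) =====
theorem locate_diffs_spec : Claim_equal_locate_diffs := by
  intro seed1 seed2 _
  unfold Spec_locate_diffs locate_diffs locate_diffs_alt
  have hlen : min (PySem.Str.len seed1) (PySem.Str.len seed2)
      = ((min seed1.toList.length seed2.toList.length : Nat) : Int) := by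
    simp [PySem.Str.len_eq, Nat.cast_min]
  rw [hlen]
  exact pvFoldA_eq seed1 seed2 _
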